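-- pv_equiv track=rewrite | github.com/kKEeWwon-2314/Program-Archive | Coding Questions/CCC Practice/nasty-numbers.py | if_nasty
-- ===== SOURCE A (Python) =====
-- def if_nasty(n):
--     saved = []
--
--     for i in range(1, n):
--         if (n % i == 0):
--             num1 = n / i
--             num2 = i
--             if (num1 > num2):
--                 saved.append([int(num1), num2])
--
--     for i in range(len(saved)):
--         for j in range(len(saved)):
--             if (saved[i][0] - saved[i][1] == saved[j][0] + saved[j][1]):
--                 return (str(n) + ' is nasty')
--
--     return (str(n) + ' is not nasty')
-- ===== SOURCE B (Python) =====
-- def if_nasty(n):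
--     pairs = []
--     i = 1
--     while i * i < n:
--         if n % i == 0:
--             pairs.append((n // i, i))
--         i += 1
--     sums = {a + b for a, b in pairs}
--     if any(a - b in sums for a, b in pairs):
--         return str(n) + ' is nasty'
--     return str(n) + ' is not nasty'
-- ===== Notes on version B (the rewrite author's own statement) =====
-- stated objective: faster
-- what changed: Enumerate divisors only up to sqrt(n) (each i with i*i<n gives the same pair (n//i,i) that A keeps), and replace the quadratic pair-vs-pair scan by one pass over a precomputed set of pair sums.
import Mathlib
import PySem

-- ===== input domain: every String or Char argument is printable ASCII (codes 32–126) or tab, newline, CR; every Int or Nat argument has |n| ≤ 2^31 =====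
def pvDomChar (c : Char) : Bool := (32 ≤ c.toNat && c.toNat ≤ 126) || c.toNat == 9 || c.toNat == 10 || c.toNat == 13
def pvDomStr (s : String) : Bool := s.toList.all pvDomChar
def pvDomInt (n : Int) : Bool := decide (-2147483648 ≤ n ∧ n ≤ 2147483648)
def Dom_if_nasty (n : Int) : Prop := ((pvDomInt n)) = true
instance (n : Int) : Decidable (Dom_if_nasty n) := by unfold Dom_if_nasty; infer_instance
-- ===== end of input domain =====

-- B enumerates divisors only up to sqrt(n) and replaces A's quadratic pair-vs-pair
-- scan by one pass against a precomputed set of pair sums (objective: faster).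

-- ===== PORT A =====
-- Python's 'n / i' is float division, exact here: it is only used under 'n % i == 0'
-- with 1 ≤ i and |n| ≤ 2^31 < 2^53, so 'int(n / i)' = floordiv n i and
-- 'num1 > num2' = floordiv n i > i.
def if_nasty (n : Int) : String :=
  let saved : List (Int × Int) :=
    (PySem.List.pyRange 1 n 1).foldl (fun acc i =>
      if PySem.Int.mod n i == 0 then
        let num1 := PySem.Int.floordiv n i
        let num2 := i
        if num1 > num2 then acc ++ [(num1, num2)] else acc
      else acc) []
  if saved.any (fun p => saved.any (fun q => p.1 - p.2 == q.1 + q.2)) then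
    PySem.Int.toStr n ++ " is nasty"
  else
    PySem.Int.toStr n ++ " is not nasty"

-- ===== PORT B =====
-- the 'while i * i < n' loop of Source B (i starts at 1 as a Nat counter)
def altLoop (n : Int) (i : Nat) : List (Int × Int) :=
  if h : (i : Int) * (i : Int) < n then
    (if PySem.Int.mod n (i : Int) == 0 then
        [(PySem.Int.floordiv n (i : Int), (i : Int))] else [])
      ++ altLoop n (i + 1)
  else []
termination_by n.toNat - i
decreasing_by
  have h1 : (i : Int) ≤ (i : Int) * (i : Int) := by nlinarith [sq_nonneg ((i : Int) - 1)]
  have h2 : (i : Int) < n := lt_of_le_of_lt h1 h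
  omega

def if_nasty_alt (n : Int) : String :=
  let pairs := altLoop n 1
  let sums : PySem.Set Int := PySem.Set.ofList (pairs.map (fun p => p.1 + p.2))
  if pairs.any (fun p => PySem.Set.contains sums (p.1 - p.2)) then
    PySem.Int.toStr n ++ " is nasty"
  else
    PySem.Int.toStr n ++ " is not nasty"

-- ===== PRECONDITION & SPEC =====
def Spec_if_nasty (n : Int) (out : String) : Prop := out = if_nasty_alt n
instance (n : Int) (out : String) : Decidable (Spec_if_nasty n out) := by unfold Spec_if_nasty; infer_instance

-- ===== CLAIM (what is proved, stated in full; the proofs are below) =====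
def Claim_equal_if_nasty : Prop := ∀ (n : Int), Dom_if_nasty n → Spec_if_nasty n (if_nasty n)

-- ===== LEMMAS AND PROOFS =====

-- A's saved-list as a filter+map over the range
theorem savedA_eq (n : Int) :
    (PySem.List.pyRange 1 n 1).foldl (fun acc i =>
      if PySem.Int.mod n i == 0 then
        let num1 := PySem.Int.floordiv n i
        let num2 := i
        if num1 > num2 then acc ++ [(num1, num2)] else acc
      else acc) []
    = ((PySem.List.pyRange 1 n 1).filter
        (fun i => (PySem.Int.mod n i == 0) && decide (PySem.Int.floordiv n i > i))).map
        (fun i => (PySem.Int.floordiv n i, i)) := by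
  have hf : (fun (acc : List (Int × Int)) (i : Int) =>
      if PySem.Int.mod n i == 0 then
        let num1 := PySem.Int.floordiv n i
        let num2 := i
        if num1 > num2 then acc ++ [(num1, num2)] else acc
      else acc)
      = (fun acc i =>
        if (PySem.Int.mod n i == 0) && decide (PySem.Int.floordiv n i > i) then
          acc ++ [(PySem.Int.floordiv n i, i)] else acc) := by
    funext acc i
    by_cases h1 : PySem.Int.mod n i == 0 <;>
      by_cases h2 : PySem.Int.floordiv n i > i <;> simp [h1, h2]
  rw [hf, PySem.List.foldl_append_if]
  simp

-- B's loop as a filter+map over the tail of the range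
theorem altLoop_eq (n : Int) (i : Nat) :
    altLoop n i
    = ((PySem.List.pyRange (i : Int) n 1).filter
        (fun j => decide (j * j < n) && (PySem.Int.mod n j == 0))).map
        (fun j => (PySem.Int.floordiv n j, j)) := by
  fun_induction altLoop n i with
  | case1 i h ih =>
    have hcons : PySem.List.pyRange (i : Int) n 1
        = (i : Int) :: PySem.List.pyRange ((i : Int) + 1) n 1 := by
      apply PySem.List.pyRange_one_cons
      have h1 : (i : Int) ≤ (i : Int) * (i : Int) := by nlinarith [sq_nonneg ((i : Int) - 1)]
      exact lt_of_le_of_lt h1 h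
    rw [hcons]
    push_cast at ih
    by_cases hm : PySem.Int.mod n (i : Int) == 0 <;> simp [hm, h, ih]
  | case2 i h =>
    have : ((PySem.List.pyRange (i : Int) n 1).filter
        (fun j => decide (j * j < n) && (PySem.Int.mod n j == 0))) = [] := by
      rw [List.filter_eq_nil_iff]
      intro j hj
      rw [PySem.List.mem_pyRange_one] at hj
      have hij : (i : Int) ≤ j := hj.1
      have h0 : (0 : Int) ≤ (i : Int) := by positivity
      have : (i : Int) * (i : Int) ≤ j * j := by nlinarith
      have : ¬ (j * j < n) := by omega
      simp [this]
    rw [this]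
    simp

-- for 1 ≤ i < n with n % i = 0, A's keep-condition equals B's
theorem cond_eq (n i : Int) (h1 : 1 ≤ i) (_h2 : i < n) :
    ((PySem.Int.mod n i == 0) && decide (PySem.Int.floordiv n i > i))
    = (decide (i * i < n) && (PySem.Int.mod n i == 0)) := by
  by_cases hm : PySem.Int.mod n i = 0
  · have hfd : PySem.Int.floordiv n i = n / i := PySem.Int.floordiv_eq_ediv_of_pos (by omega)
    have hme : PySem.Int.mod n i = n % i := PySem.Int.mod_eq_emod_of_pos (by omega)
    have hdvd : i ∣ n := Int.dvd_of_emod_eq_zero (by rw [← hme]; exact hm)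
    have hn : n = i * (n / i) := (Int.mul_ediv_cancel' hdvd).symm
    have hiff : PySem.Int.floordiv n i > i ↔ i * i < n := by
      rw [hfd]
      constructor
      · intro hgt; nlinarith
      · intro hlt
        by_contra hle
        rw [not_lt] at hle
        nlinarith
    by_cases hgt : PySem.Int.floordiv n i > i
    · simp [hm, hgt, hiff.mp hgt]
    · have : ¬ (i * i < n) := fun hc => hgt (hiff.mpr hc)
      simp [hm, hgt, this]
  · have : ¬ (PySem.Int.mod n i == 0) = true := by simp [hm]
    simp [this]

theorem pairs_eq (n : Int) :
    (PySem.List.pyRange 1 n 1).foldl (fun acc i =>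
      if PySem.Int.mod n i == 0 then
        let num1 := PySem.Int.floordiv n i
        let num2 := i
        if num1 > num2 then acc ++ [(num1, num2)] else acc
      else acc) []
    = altLoop n 1 := by
  rw [savedA_eq, altLoop_eq]
  have : ((1 : Nat) : Int) = (1 : Int) := by norm_num
  rw [this]
  congr 1
  apply List.filter_congr
  intro i hi
  rw [PySem.List.mem_pyRange_one] at hi
  exact cond_eq n i hi.1 hi.2

-- A's quadratic scan equals B's membership test in the set of sums
theorem any_eq (l : List (Int × Int)) :
    l.any (fun p => l.any (fun q => p.1 - p.2 == q.1 + q.2))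
    = l.any (fun p =>
        PySem.Set.contains (PySem.Set.ofList (l.map (fun q => q.1 + q.2))) (p.1 - p.2)) := by
  rw [Bool.eq_iff_iff]
  simp only [List.any_eq_true, PySem.Set.contains, List.contains_iff_mem,
    PySem.Set.mem_ofList, List.mem_map, beq_iff_eq]
  constructor
  · rintro ⟨p, hp, q, hq, he⟩; exact ⟨p, hp, q, hq, he.symm⟩
  · rintro ⟨p, hp, q, hq, he⟩; exact ⟨p, hp, q, hq, he.symm⟩

-- ===== VERDICT (by name: the statement is the Claim_ definition above) =====
theorem if_nasty_spec : Claim_equal_if_nasty := by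
  intro n _
  unfold Spec_if_nasty if_nasty if_nasty_alt
  simp only []
  rw [pairs_eq, any_eq]
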